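-- pv_equiv track=rewrite | github.com/bond005/ru_llm_instruct | ner/ner.py | match_entities_to_tokens
-- ===== SOURCE A (Python) =====
-- from typing import List, Tuple
--
-- def find_subphrase(full_phrase: List[str], subphrase: List[str]) -> int:
--     n = len(subphrase)
--     subphrase_ = ' '.join(subphrase).lower()
--     if n > len(full_phrase):
--         return -1
--     if n == len(full_phrase):
--         if subphrase_ == ' '.join(full_phrase).lower():
--             return 0
--         return -1
--     found_idx = -1
--     for idx in range(len(full_phrase) - n + 1):
--         if subphrase_ == ' '.join(full_phrase[idx:(idx + n)]).lower():
--             found_idx = idx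
--             break
--     return found_idx
--
-- def match_entities_to_tokens(tokens: List[str], prepared_entities: List[List[str]],
--                              entity_bounds: List[Tuple[int, int]],
--                              penalty: int, start_pos: int = 0) -> List[Tuple[List[Tuple[int, int]], int]]:
--     if len(prepared_entities) == 0:
--         return [([], 0)]
--     if (len(tokens) == 0) and (len(prepared_entities) > 0):
--         return [(entity_bounds, penalty + len(prepared_entities))]
--     new_penalty = penalty
--     found_token_idx = find_subphrase(tokens, prepared_entities[0])
--     if found_token_idx >= 0:
--         entity_bounds_ = entity_bounds + [(
--             found_token_idx + start_pos,
--             found_token_idx + len(prepared_entities[0]) + start_pos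
--         )]
--         if len(prepared_entities) > 1:
--             res = match_entities_to_tokens(tokens[(found_token_idx + len(prepared_entities[0])):],
--                                            prepared_entities[1:], entity_bounds_,
--                                            new_penalty, found_token_idx + len(prepared_entities[0]) + start_pos)
--             res += match_entities_to_tokens(tokens[found_token_idx:], prepared_entities[1:], entity_bounds_,
--                                             new_penalty, found_token_idx + start_pos)
--         else:
--             res = [(entity_bounds_, new_penalty)]
--     else:
--         new_penalty += 1
--         if len(prepared_entities) > 1:
--             res = match_entities_to_tokens(tokens, prepared_entities[1:], entity_bounds, new_penalty, start_pos)
--         else: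
--             res = [(entity_bounds, new_penalty)]
--     return res
-- ===== SOURCE B (Python) =====
-- from typing import List, Tuple
--
-- def find_subphrase(full_phrase: List[str], subphrase: List[str]) -> int:
--     n = len(subphrase)
--     subphrase_ = ' '.join(subphrase).lower()
--     if n > len(full_phrase):
--         return -1
--     if n == len(full_phrase):
--         if subphrase_ == ' '.join(full_phrase).lower():
--             return 0
--         return -1
--     found_idx = -1
--     for idx in range(len(full_phrase) - n + 1):
--         if subphrase_ == ' '.join(full_phrase[idx:(idx + n)]).lower():
--             found_idx = idx
--             break
--     return found_idx
--
-- def match_entities_to_tokens(tokens: List[str], prepared_entities: List[List[str]],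
--                              entity_bounds: List[Tuple[int, int]],
--                              penalty: int, start_pos: int = 0) -> List[Tuple[List[Tuple[int, int]], int]]:
--     # Iterative DFS with an explicit stack of partial states instead of recursion.
--     results = []
--     stack = [(tokens, prepared_entities, entity_bounds, penalty, start_pos)]
--     while stack:
--         toks, ents, bounds, pen, sp = stack.pop()
--         if not ents:
--             results.append(([], 0))
--             continue
--         if not toks:
--             results.append((bounds, pen + len(ents)))
--             continue
--         first = ents[0]
--         idx = find_subphrase(toks, first)
--         if idx >= 0:
--             bounds_ = bounds + [(idx + sp, idx + len(first) + sp)]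
--             if len(ents) > 1:
--                 end = idx + len(first)
--                 stack.append((toks[idx:], ents[1:], bounds_, pen, idx + sp))
--                 stack.append((toks[end:], ents[1:], bounds_, pen, end + sp))
--             else:
--                 results.append((bounds_, pen))
--         else:
--             if len(ents) > 1:
--                 stack.append((toks, ents[1:], bounds, pen + 1, sp))
--             else:
--                 results.append((bounds, pen + 1))
--     return results
-- ===== Notes on version B (the rewrite author's own statement) =====
-- stated objective: alternative
-- what changed: match_entities_to_tokens is rewritten as an iterative DFS over an explicit stack of partial states (remaining tokens, remaining entities, bounds, penalty, start position), collecting leaf tuples in pop order, instead of A's tree recursion with list concatenation; find_subphrase is kept verbatim.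
import Mathlib
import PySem

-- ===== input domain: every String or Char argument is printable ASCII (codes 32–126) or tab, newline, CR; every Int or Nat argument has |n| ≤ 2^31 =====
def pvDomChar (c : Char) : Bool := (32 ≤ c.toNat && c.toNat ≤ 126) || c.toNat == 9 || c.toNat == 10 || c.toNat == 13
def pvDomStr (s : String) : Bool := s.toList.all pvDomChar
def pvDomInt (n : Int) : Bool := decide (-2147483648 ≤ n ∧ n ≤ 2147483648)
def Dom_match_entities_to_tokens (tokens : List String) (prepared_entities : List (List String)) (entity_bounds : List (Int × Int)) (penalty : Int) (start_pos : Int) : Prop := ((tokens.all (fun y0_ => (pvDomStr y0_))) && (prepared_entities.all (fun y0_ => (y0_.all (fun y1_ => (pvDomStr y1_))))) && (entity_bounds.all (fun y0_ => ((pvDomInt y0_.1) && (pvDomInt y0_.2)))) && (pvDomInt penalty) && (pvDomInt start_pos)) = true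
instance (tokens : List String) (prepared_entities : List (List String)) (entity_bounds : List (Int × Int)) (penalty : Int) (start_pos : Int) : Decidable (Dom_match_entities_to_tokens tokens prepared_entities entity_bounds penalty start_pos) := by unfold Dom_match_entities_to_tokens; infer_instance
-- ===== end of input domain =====

-- B replaces A's recursion by an explicit DFS stack of partial states (same leaf tuples, same
-- pre-order concatenation); find_subphrase is shared verbatim. Objective: alternative decomposition.

-- ===== PORT A =====
-- shared helper (identical in Source A and Source B): the 'for idx in range(...)' loop with break
def fsLoop (full_phrase : List String) (subphrase_ : String) (n : Nat) : List Int → Int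
  | [] => -1
  | idx :: rest =>
    if subphrase_ == PySem.Str.lower (PySem.Str.join " " (PySem.List.slice full_phrase (some idx) (some (idx + (n : Int))))) then idx
    else fsLoop full_phrase subphrase_ n rest

def find_subphrase (full_phrase : List String) (subphrase : List String) : Int :=
  let n := subphrase.length
  let subphrase_ := PySem.Str.lower (PySem.Str.join " " subphrase)
  if n > full_phrase.length then -1
  else if n = full_phrase.length then
    (if subphrase_ == PySem.Str.lower (PySem.Str.join " " full_phrase) then 0 else -1)
  else
    fsLoop full_phrase subphrase_ n (PySem.List.pyRange 0 ((full_phrase.length : Int) - (n : Int) + 1) 1)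

def match_entities_to_tokens (tokens : List String) (prepared_entities : List (List String)) (entity_bounds : List (Int × Int)) (penalty : Int) (start_pos : Int) : List ((List (Int × Int)) × Int) :=
  match prepared_entities with
  | [] => [([], 0)]
  | e :: rest =>
    if tokens.length = 0 then [(entity_bounds, penalty + ((e :: rest).length : Int))]
    else
      let found_token_idx := find_subphrase tokens e
      if 0 ≤ found_token_idx then
        let entity_bounds_ := entity_bounds ++ [(found_token_idx + start_pos, found_token_idx + (e.length : Int) + start_pos)]
        if rest.length > 0 then
          match_entities_to_tokens (PySem.List.slice tokens (some (found_token_idx + (e.length : Int))) none) rest entity_bounds_ penalty (found_token_idx + (e.length : Int) + start_pos)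
          ++ match_entities_to_tokens (PySem.List.slice tokens (some found_token_idx) none) rest entity_bounds_ penalty (found_token_idx + start_pos)
        else [(entity_bounds_, penalty)]
      else
        if rest.length > 0 then
          match_entities_to_tokens tokens rest entity_bounds (penalty + 1) start_pos
        else [(entity_bounds, penalty + 1)]

-- ===== PORT B =====
-- the while-stack loop of Source B; a state is (toks, ents, bounds, pen, sp)
def mettLoop : List (List String × List (List String) × List (Int × Int) × Int × Int) → List ((List (Int × Int)) × Int) → List ((List (Int × Int)) × Int)
  | [], results => results
  | (toks, ents, bounds, pen, sp) :: stack, results =>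
    match ents with
    | [] => mettLoop stack (results ++ [([], 0)])
    | first :: restE =>
      if toks.length = 0 then mettLoop stack (results ++ [(bounds, pen + ((first :: restE).length : Int))])
      else
        if 0 ≤ find_subphrase toks first then
          if restE.length > 0 then
            -- python pushes the retry state first, then the consume state (popped first)
            mettLoop ((PySem.List.slice toks (some (find_subphrase toks first + (first.length : Int))) none, restE,
                        bounds ++ [(find_subphrase toks first + sp, find_subphrase toks first + (first.length : Int) + sp)], pen,
                        find_subphrase toks first + (first.length : Int) + sp)
                      :: (PySem.List.slice toks (some (find_subphrase toks first)) none, restE,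
                        bounds ++ [(find_subphrase toks first + sp, find_subphrase toks first + (first.length : Int) + sp)], pen,
                        find_subphrase toks first + sp)
                      :: stack) results
          else mettLoop stack (results ++ [(bounds ++ [(find_subphrase toks first + sp, find_subphrase toks first + (first.length : Int) + sp)], pen)])
        else
          if restE.length > 0 then mettLoop ((toks, restE, bounds, pen + 1, sp) :: stack) results
          else mettLoop stack (results ++ [(bounds, pen + 1)])
  termination_by stack _ => (stack.map (fun st => 3 ^ st.2.1.length)).sum
  decreasing_by all_goals
    (simp only [List.map_cons, List.sum_cons, List.length_cons, List.length_nil, pow_zero, pow_succ]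
     first
     | omega
     | (have h1 : 0 < 3 ^ restE.length := by positivity
        omega))

def match_entities_to_tokens_alt (tokens : List String) (prepared_entities : List (List String)) (entity_bounds : List (Int × Int)) (penalty : Int) (start_pos : Int) : List ((List (Int × Int)) × Int) :=
  mettLoop [(tokens, prepared_entities, entity_bounds, penalty, start_pos)] []

-- ===== PRECONDITION & SPEC =====
def Spec_match_entities_to_tokens (tokens : List String) (prepared_entities : List (List String)) (entity_bounds : List (Int × Int)) (penalty : Int) (start_pos : Int) (out : List ((List (Int × Int)) × Int)) : Prop := out = match_entities_to_tokens_alt tokens prepared_entities entity_bounds penalty start_pos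
instance (tokens : List String) (prepared_entities : List (List String)) (entity_bounds : List (Int × Int)) (penalty : Int) (start_pos : Int) (out : List ((List (Int × Int)) × Int)) : Decidable (Spec_match_entities_to_tokens tokens prepared_entities entity_bounds penalty start_pos out) := by unfold Spec_match_entities_to_tokens; infer_instance

-- ===== CLAIM (what is proved, stated in full; the proofs are below) =====
def Claim_equal_match_entities_to_tokens : Prop := ∀ (tokens : List String) (prepared_entities : List (List String)) (entity_bounds : List (Int × Int)) (penalty : Int) (start_pos : Int), Dom_match_entities_to_tokens tokens prepared_entities entity_bounds penalty start_pos → Spec_match_entities_to_tokens tokens prepared_entities entity_bounds penalty start_pos (match_entities_to_tokens tokens prepared_entities entity_bounds penalty start_pos)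

-- ===== LEMMAS AND PROOFS =====
-- A's result on a stacked state
def runA (st : List String × List (List String) × List (Int × Int) × Int × Int) : List ((List (Int × Int)) × Int) :=
  match_entities_to_tokens st.1 st.2.1 st.2.2.1 st.2.2.2.1 st.2.2.2.2

theorem mettLoop_eq (stack : List (List String × List (List String) × List (Int × Int) × Int × Int)) (results : List ((List (Int × Int)) × Int)) :
    mettLoop stack results = results ++ (stack.map runA).flatten := by
  fun_induction mettLoop stack results with
  | case1 results => simp
  | case2 toks bounds pen sp stack results ih =>
    rw [ih]; simp [runA, match_entities_to_tokens]
  | case3 toks bounds pen sp stack results first restE h0 ih =>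
    rw [ih]; simp [runA, match_entities_to_tokens, h0]
  | case4 toks bounds pen sp stack results first restE h0 hge hrest ih =>
    rw [ih]
    simp only [List.map_cons, List.flatten_cons, runA]
    conv_rhs => rw [match_entities_to_tokens]
    simp [h0, hge, hrest, List.append_assoc]
  | case5 toks bounds pen sp stack results first restE h0 hge hrest ih =>
    rw [ih]
    simp only [List.map_cons, List.flatten_cons, runA]
    conv_rhs => rw [match_entities_to_tokens]
    simp [h0, hge, hrest, List.append_assoc]
  | case6 toks bounds pen sp stack results first restE h0 hge hrest ih =>
    rw [ih]
    simp only [List.map_cons, List.flatten_cons, runA]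
    conv_rhs => rw [match_entities_to_tokens]
    simp [h0, hge, hrest]
  | case7 toks bounds pen sp stack results first restE h0 hge hrest ih =>
    rw [ih]
    simp only [List.map_cons, List.flatten_cons, runA]
    conv_rhs => rw [match_entities_to_tokens]
    simp [h0, hge, hrest, List.append_assoc]

-- ===== VERDICT (by name: the statement is the Claim_ definition above) =====
theorem match_entities_to_tokens_spec : Claim_equal_match_entities_to_tokens := by
  intro tokens prepared_entities entity_bounds penalty start_pos _dom
  unfold Spec_match_entities_to_tokens match_entities_to_tokens_alt
  rw [mettLoop_eq]
  simp [runA]
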